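-- pv_equiv track=rewrite | github.com/MahadMuhammad/custom_aes | src/main.py | substitute_nibbles
-- ===== SOURCE A (Python) =====
-- def substitute_nibbles(plainTextBinary: str) -> list:
--     """
--     substituting each nibble in the block with a different one
--     """
--     # From the given document
--     sBox: dict = {
--         "0000": "1010",
--         "0001": "0000",
--         "0010": "1001",
--         "0011": "1110",
--         "0100": "0110",
--         "0101": "0011",
--         "0110": "1111",
--         "0111": "0101",
--         "1000": "0001",
--         "1001": "1101",
--         "1010": "1100",
--         "1011": "0111",
--         "1100": "1011",
--         "1101": "0100",
--         "1110": "0010",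
--         "1111": "1000",
--     }
--
--     subNibbles: list[str] = list()
--     if len(plainTextBinary) == 4:
--         # input is a 4 bit nibble
--         subNibbles.append(sBox[plainTextBinary])
--     elif len(plainTextBinary) == 16:
--         # splitting into 4 bit nibbles
--         for i in range(0, 16, 4):
--             subNibbles.append(sBox[plainTextBinary[i : i + 4]])
--     else:
--         raise ValueError("Invalid must be either 4 or 16 bits long")
--
--     hexValues: list = list()
--
--     for binaryValue in subNibbles:
--         hexValue = hex(int(binaryValue, 2))[2:]
--         hexValues.append(hexValue)
--
--     return hexValues
-- ===== SOURCE B (Python) =====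
-- # Fused table: each 4-bit nibble maps straight to its final hex digit
-- # (value = hex(int(sBox[k], 2))[2:]), so substitution and hex conversion
-- # happen in one pass with no intermediate list.
-- _NIBBLE_TO_HEX = {
--     "0000": "a", "0001": "0", "0010": "9", "0011": "e",
--     "0100": "6", "0101": "3", "0110": "f", "0111": "5",
--     "1000": "1", "1001": "d", "1010": "c", "1011": "7",
--     "1100": "b", "1101": "4", "1110": "2", "1111": "8",
-- }
--
--
-- def substitute_nibbles(plainTextBinary: str) -> list:
--     if len(plainTextBinary) not in (4, 16):
--         raise ValueError("Invalid must be either 4 or 16 bits long")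
--     return [_NIBBLE_TO_HEX[plainTextBinary[i:i + 4]]
--             for i in range(0, len(plainTextBinary), 4)]
-- ===== Notes on version B (the rewrite author's own statement) =====
-- stated objective: simpler
-- what changed: A's two sequential passes (S-box substitution building an intermediate list, then a second loop converting each binary value via hex(int(.,2))[2:]) are fused into one pass over the nibbles using a single precomputed nibble-to-hex-digit table, eliminating the intermediate list and the numeric conversion entirely.
import Mathlib
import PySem

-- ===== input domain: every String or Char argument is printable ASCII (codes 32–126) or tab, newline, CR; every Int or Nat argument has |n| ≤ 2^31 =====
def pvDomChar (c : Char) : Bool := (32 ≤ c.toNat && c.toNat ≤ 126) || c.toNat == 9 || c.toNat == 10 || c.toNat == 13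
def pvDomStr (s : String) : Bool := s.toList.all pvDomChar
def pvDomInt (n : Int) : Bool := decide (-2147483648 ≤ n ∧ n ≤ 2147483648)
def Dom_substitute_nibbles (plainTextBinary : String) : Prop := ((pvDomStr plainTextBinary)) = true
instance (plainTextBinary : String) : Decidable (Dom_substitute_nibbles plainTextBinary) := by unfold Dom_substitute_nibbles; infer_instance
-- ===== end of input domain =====

-- B fuses A's two passes (S-box substitution, then binary→hex conversion) into one pass
-- over the nibbles using a single precomputed nibble→hex-digit table (objective: simpler).


-- ===== PORT A =====
-- A's sBox dict: 4-bit binary string -> 4-bit binary string (on List Char).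
def pvSBoxA : PySem.Dict (List Char) (List Char) :=
  PySem.Dict.ofList [
    (['0', '0', '0', '0'], ['1', '0', '1', '0']),
    (['0', '0', '0', '1'], ['0', '0', '0', '0']),
    (['0', '0', '1', '0'], ['1', '0', '0', '1']),
    (['0', '0', '1', '1'], ['1', '1', '1', '0']),
    (['0', '1', '0', '0'], ['0', '1', '1', '0']),
    (['0', '1', '0', '1'], ['0', '0', '1', '1']),
    (['0', '1', '1', '0'], ['1', '1', '1', '1']),
    (['0', '1', '1', '1'], ['0', '1', '0', '1']),
    (['1', '0', '0', '0'], ['0', '0', '0', '1']),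
    (['1', '0', '0', '1'], ['1', '1', '0', '1']),
    (['1', '0', '1', '0'], ['1', '1', '0', '0']),
    (['1', '0', '1', '1'], ['0', '1', '1', '1']),
    (['1', '1', '0', '0'], ['1', '0', '1', '1']),
    (['1', '1', '0', '1'], ['0', '1', '0', '0']),
    (['1', '1', '1', '0'], ['0', '0', '1', '0']),
    (['1', '1', '1', '1'], ['1', '0', '0', '0'])]

-- hand port of hex(n)[2:]; exact for 0 ≤ n < 16, the only values reached here
-- (every sBox value is a 4-bit binary string).
def pvHexNibble (n : Int) : List Char :=
  if n < 10 then [Char.ofNat (48 + n.toNat)] else [Char.ofNat (87 + n.toNat)]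

-- literal port of A over s.toList; a missing sBox key (KeyError) / a wrong length
-- (ValueError) is excluded by Pre_, so getD / the final else branch are never reached there.
def pvSubNibblesA (cs : List Char) : List String :=
  let subNibbles : List (List Char) :=
    if cs.length = 4 then
      [(pvSBoxA.get? cs).getD []]
    else if cs.length = 16 then
      (PySem.List.pyRange 0 16 4).foldl
        (fun acc i => acc ++ [(pvSBoxA.get? (PySem.List.slice cs (some i) (some (i + 4)))).getD []]) []
    else []
  subNibbles.foldl
    (fun acc b => acc ++ [String.ofList (pvHexNibble ((PySem.Int.ofCharsBase? b 2).getD 0))]) []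

def substitute_nibbles (plainTextBinary : String) : List String :=
  pvSubNibblesA plainTextBinary.toList

-- ===== PORT B =====
-- B's fused table: 4-bit binary string -> final hex digit.
def pvNibbleToHex : PySem.Dict (List Char) String :=
  PySem.Dict.ofList [
    (['0', '0', '0', '0'], "a"),
    (['0', '0', '0', '1'], "0"),
    (['0', '0', '1', '0'], "9"),
    (['0', '0', '1', '1'], "e"),
    (['0', '1', '0', '0'], "6"),
    (['0', '1', '0', '1'], "3"),
    (['0', '1', '1', '0'], "f"),
    (['0', '1', '1', '1'], "5"),
    (['1', '0', '0', '0'], "1"),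
    (['1', '0', '0', '1'], "d"),
    (['1', '0', '1', '0'], "c"),
    (['1', '0', '1', '1'], "7"),
    (['1', '1', '0', '0'], "b"),
    (['1', '1', '0', '1'], "4"),
    (['1', '1', '1', '0'], "2"),
    (['1', '1', '1', '1'], "8")]

-- literal port of Source B over s.toList; the ValueError branch / a missing key is outside Pre_.
def pvSubNibblesB (cs : List Char) : List String :=
  if cs.length = 4 ∨ cs.length = 16 then
    (PySem.List.pyRange 0 (cs.length : Int) 4).foldl
      (fun acc i => acc ++ [(pvNibbleToHex.get? (PySem.List.slice cs (some i) (some (i + 4)))).getD ""]) []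
  else []

def substitute_nibbles_alt (plainTextBinary : String) : List String :=
  pvSubNibblesB plainTextBinary.toList

-- ===== PRECONDITION & SPEC =====
-- Pre_ excludes the inputs where A raises: a length other than 4 or 16 (ValueError)
-- and any character other than '0'/'1' (KeyError on the sBox lookup).
def Pre_substitute_nibbles (plainTextBinary : String) : Prop :=
  (plainTextBinary.toList.length = 4 ∨ plainTextBinary.toList.length = 16) ∧
    (plainTextBinary.toList.all fun c => c == '0' || c == '1') = true
instance (plainTextBinary : String) : Decidable (Pre_substitute_nibbles plainTextBinary) := by
  unfold Pre_substitute_nibbles; infer_instance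

def pvWitness_substitute_nibbles : String := "0000"

def Spec_substitute_nibbles (plainTextBinary : String) (out : List String) : Prop := out = substitute_nibbles_alt plainTextBinary
instance (plainTextBinary : String) (out : List String) : Decidable (Spec_substitute_nibbles plainTextBinary out) := by unfold Spec_substitute_nibbles; infer_instance

-- ===== CLAIM (what is proved, stated in full; the proofs are below) =====
def Claim_equal_substitute_nibbles : Prop := ∀ (plainTextBinary : String), Dom_substitute_nibbles plainTextBinary → Pre_substitute_nibbles plainTextBinary → Spec_substitute_nibbles plainTextBinary (substitute_nibbles plainTextBinary)

-- ===== LEMMAS AND PROOFS =====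

-- A's per-nibble pipeline (S-box lookup, then hex(int(.,2))[2:]) agrees with B's fused
-- lookup on every 4-bit binary nibble: 16 cases, each closed by decide.
theorem pv_nib (a b c d : Char) (ha : a = '0' ∨ a = '1') (hb : b = '0' ∨ b = '1')
    (hc : c = '0' ∨ c = '1') (hd : d = '0' ∨ d = '1') :
    String.ofList (pvHexNibble ((PySem.Int.ofCharsBase? ((pvSBoxA.get? [a, b, c, d]).getD []) 2).getD 0)) =
      (pvNibbleToHex.get? [a, b, c, d]).getD "" := by
  rcases ha with rfl | rfl <;> rcases hb with rfl | rfl <;>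
    rcases hc with rfl | rfl <;> rcases hd with rfl | rfl <;> decide

theorem pv_core (cs : List Char) (hlen : cs.length = 4 ∨ cs.length = 16)
    (hbits : ∀ c ∈ cs, c = '0' ∨ c = '1') : pvSubNibblesA cs = pvSubNibblesB cs := by
  rcases hlen with h4 | h16
  · obtain ⟨a, b, c, d, rfl⟩ : ∃ a b c d, cs = [a, b, c, d] := by
      match cs, h4 with
      | [a, b, c, d], _ => exact ⟨a, b, c, d, rfl⟩
    have hA : pvSubNibblesA [a, b, c, d] =
        [String.ofList (pvHexNibble ((PySem.Int.ofCharsBase? ((pvSBoxA.get? [a, b, c, d]).getD []) 2).getD 0))] := rfl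
    have hB : pvSubNibblesB [a, b, c, d] = [(pvNibbleToHex.get? [a, b, c, d]).getD ""] := by
      have hr : PySem.List.pyRange 0 (4 : Int) 4 = [0] := by decide
      simp only [pvSubNibblesB, List.length_cons, List.length_nil]
      norm_num [hr, PySem.List.slice, PySem.List.clampIdx]
      simp
    rw [hA, hB, pv_nib a b c d (hbits a (by simp)) (hbits b (by simp)) (hbits c (by simp)) (hbits d (by simp))]
  · obtain ⟨c0, c1, c2, c3, c4, c5, c6, c7, c8, c9, c10, c11, c12, c13, c14, c15, rfl⟩ :
        ∃ c0 c1 c2 c3 c4 c5 c6 c7 c8 c9 c10 c11 c12 c13 c14 c15,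
          cs = [c0, c1, c2, c3, c4, c5, c6, c7, c8, c9, c10, c11, c12, c13, c14, c15] := by
      match cs, h16 with
      | [c0, c1, c2, c3, c4, c5, c6, c7, c8, c9, c10, c11, c12, c13, c14, c15], _ =>
        exact ⟨c0, c1, c2, c3, c4, c5, c6, c7, c8, c9, c10, c11, c12, c13, c14, c15, rfl⟩
    have hA : pvSubNibblesA [c0, c1, c2, c3, c4, c5, c6, c7, c8, c9, c10, c11, c12, c13, c14, c15] =
        [String.ofList (pvHexNibble ((PySem.Int.ofCharsBase? ((pvSBoxA.get? [c0, c1, c2, c3]).getD []) 2).getD 0)),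
         String.ofList (pvHexNibble ((PySem.Int.ofCharsBase? ((pvSBoxA.get? [c4, c5, c6, c7]).getD []) 2).getD 0)),
         String.ofList (pvHexNibble ((PySem.Int.ofCharsBase? ((pvSBoxA.get? [c8, c9, c10, c11]).getD []) 2).getD 0)),
         String.ofList (pvHexNibble ((PySem.Int.ofCharsBase? ((pvSBoxA.get? [c12, c13, c14, c15]).getD []) 2).getD 0))] := rfl
    have hB : pvSubNibblesB [c0, c1, c2, c3, c4, c5, c6, c7, c8, c9, c10, c11, c12, c13, c14, c15] =
        [(pvNibbleToHex.get? [c0, c1, c2, c3]).getD "",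
         (pvNibbleToHex.get? [c4, c5, c6, c7]).getD "",
         (pvNibbleToHex.get? [c8, c9, c10, c11]).getD "",
         (pvNibbleToHex.get? [c12, c13, c14, c15]).getD ""] := by
      have hr : PySem.List.pyRange 0 (16 : Int) 4 = [0, 4, 8, 12] := by decide
      simp only [pvSubNibblesB, List.length_cons, List.length_nil]
      norm_num [hr, PySem.List.slice, PySem.List.clampIdx]
      simp
    rw [hA, hB]
    simp only [List.cons.injEq, and_true]
    refine ⟨?_, ?_, ?_, ?_⟩ <;>
      exact pv_nib _ _ _ _ (hbits _ (by simp)) (hbits _ (by simp)) (hbits _ (by simp)) (hbits _ (by simp))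

-- ===== VERDICT (by name: the statement is the Claim_ definition above) =====
theorem substitute_nibbles_spec : Claim_equal_substitute_nibbles := by
  intro s _ hpre
  unfold Spec_substitute_nibbles substitute_nibbles substitute_nibbles_alt
  refine pv_core s.toList hpre.1 ?_
  intro c hc
  have h := hpre.2
  rw [List.all_eq_true] at h
  simpa using h c hc
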